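-- pv_equiv track=rewrite | github.com/sungjaeshim/ai-productivity-lab | scripts/export-notion-live-signals.py | find_prop
-- ===== SOURCE A (Python) =====
-- from typing import Any
--
-- def find_prop(props: dict[str, Any], names: list[str], ptype: str | None = None) -> str | None:
--     lowered = {k.lower(): k for k in props.keys()}
--     for name in names:
--         actual = lowered.get(name.lower())
--         if actual is None:
--             continue
--         if ptype and props[actual].get("type") != ptype:
--             continue
--         return actual
--     return None
-- ===== SOURCE B (Python) =====
-- def find_prop(props, names, ptype=None):
--     # Rank each distinct lowered candidate name by its first position in
--     # `names`, bucket the property items by that rank in one pass (later keys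
--     # overwrite earlier ones), then return the smallest-ranked bucket passing
--     # the type filter.
--     rank = {}
--     for i, name in enumerate(names):
--         low = name.lower()
--         if low not in rank:
--             rank[low] = i
--     best = {}
--     for key, value in props.items():
--         r = rank.get(key.lower())
--         if r is not None:
--             best[r] = (key, value)
--     for r in sorted(best):
--         key, value = best[r]
--         if not (ptype and value.get("type") != ptype):
--             return key
--     return None
-- ===== Notes on version B (the rewrite author's own statement) =====
-- stated objective: alternative
-- what changed: B inverts the traversal: it ranks each distinct lowered candidate name by its first position in names, buckets the property items by rank in a single pass over props (later keys overwriting earlier ones), and returns the key of the smallest-ranked bucket that passes the type filter, instead of A's lowered-key index probed once per candidate name.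
import Mathlib
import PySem

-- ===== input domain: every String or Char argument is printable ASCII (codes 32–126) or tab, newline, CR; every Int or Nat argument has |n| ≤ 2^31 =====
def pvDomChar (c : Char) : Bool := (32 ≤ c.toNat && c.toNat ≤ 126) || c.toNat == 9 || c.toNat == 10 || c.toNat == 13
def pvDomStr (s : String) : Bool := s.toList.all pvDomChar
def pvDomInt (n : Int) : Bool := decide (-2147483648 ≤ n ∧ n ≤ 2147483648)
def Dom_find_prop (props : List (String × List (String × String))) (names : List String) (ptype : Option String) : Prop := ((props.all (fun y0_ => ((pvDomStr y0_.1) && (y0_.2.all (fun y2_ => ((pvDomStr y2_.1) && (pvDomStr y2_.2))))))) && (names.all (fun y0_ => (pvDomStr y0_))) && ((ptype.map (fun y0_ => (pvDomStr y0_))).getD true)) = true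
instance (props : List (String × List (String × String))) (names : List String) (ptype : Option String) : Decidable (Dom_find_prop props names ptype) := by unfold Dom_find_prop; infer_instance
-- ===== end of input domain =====

-- B replaces A's lowered-key index probed per candidate name by a rank-and-bucket pipeline
-- (rank lowered names by first position, bucket the items by rank, take the smallest passing
-- rank); alternative decomposition, return value only, neither version mutates its arguments.

-- Python truthiness of `ptype` (None and "" are falsy)
def pvTruthy (o : Option String) : Bool :=
  match o with
  | none => false
  | some s => !(s == "")

-- ===== PORT A =====
-- the `for name in names:` loop of A
def findLoopA (d : PySem.Dict String (List (String × String)))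
    (lowered : PySem.Dict String String) (names : List String) (ptype : Option String) :
    Option String :=
  match names with
  | [] => none
  | name :: rest =>
    match lowered.get? (PySem.Str.lower name) with
    | none => findLoopA d lowered rest ptype
    | some actual =>
      if pvTruthy ptype then
        match d.get? actual with
        | none => none  -- unreachable: `actual` is always a key of `d` (Python KeyError impossible)
        | some inner =>
          if ((PySem.Dict.ofList inner).get? "type") != ptype then findLoopA d lowered rest ptype
          else some actual
      else some actual

def find_prop (props : List (String × List (String × String))) (names : List String) (ptype : Option String) : Option String :=
  let d := PySem.Dict.ofList props
  let lowered := d.keys.foldl (fun acc k => acc.insert (PySem.Str.lower k) k) PySem.Dict.empty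
  findLoopA d lowered names ptype

-- ===== PORT B =====
-- the `for r in sorted(best):` loop of B
def scanRanks (best : PySem.Dict Int (String × List (String × String))) (ptype : Option String) :
    List Int → Option String
  | [] => none
  | r :: rest =>
    match best.get? r with
    | none => none  -- unreachable: r ranges over best's own keys (Python KeyError impossible)
    | some kv =>
      if !(pvTruthy ptype && (((PySem.Dict.ofList kv.2).get? "type") != ptype)) then some kv.1
      else scanRanks best ptype rest

def find_prop_alt (props : List (String × List (String × String))) (names : List String) (ptype : Option String) : Option String :=
  let rank := (PySem.List.enumerate names 0).foldl
      (fun acc p =>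
        let low := PySem.Str.lower p.2
        if acc.contains low then acc else acc.insert low p.1)
      (PySem.Dict.empty : PySem.Dict String Int)
  let best := (PySem.Dict.ofList props).items.foldl
      (fun acc kv =>
        match rank.get? (PySem.Str.lower kv.1) with
        | some r => acc.insert r kv
        | none => acc)
      (PySem.Dict.empty : PySem.Dict Int (String × List (String × String)))
  scanRanks best ptype (PySem.List.sorted best.keys (fun x => x) false)

-- ===== PRECONDITION & SPEC =====
def Spec_find_prop (props : List (String × List (String × String))) (names : List String) (ptype : Option String) (out : Option String) : Prop := out = find_prop_alt props names ptype
instance (props : List (String × List (String × String))) (names : List String) (ptype : Option String) (out : Option String) : Decidable (Spec_find_prop props names ptype out) := by unfold Spec_find_prop; infer_instance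

-- ===== CLAIM (what is proved, stated in full; the proofs are below) =====
def Claim_equal_find_prop : Prop := ∀ (props : List (String × List (String × String))) (names : List String) (ptype : Option String), Dom_find_prop props names ptype → Spec_find_prop props names ptype (find_prop props names ptype)

-- ===== LEMMAS AND PROOFS =====

-- reference objects shared by both directions of the proof
def pvPass (ptype : Option String) (kv : String × List (String × String)) : Bool :=
  !(pvTruthy ptype && (((PySem.Dict.ofList kv.2).get? "type") != ptype))

-- last item whose lowered key is t (the candidate A's `lowered` dict designates)
def pvCand (items : List (String × List (String × String))) (t : String) :
    Option (String × List (String × String)) :=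
  items.foldl (fun acc kv => if PySem.Str.lower kv.1 == t then some kv else acc) none

-- rank of a lowered name: its first index in names
def pvRk (names : List String) (t : String) : Option Int :=
  (names.findIdx? (fun n => PySem.Str.lower n == t)).map (fun (j : Nat) => (j : Int))

-- last item whose lowered key has rank r (what B's `best` stores at r)
def pvLmr (items : List (String × List (String × String))) (names : List String) (r : Int) :
    Option (String × List (String × String)) :=
  items.foldl (fun acc kv => if pvRk names (PySem.Str.lower kv.1) == some r then some kv else acc) none

-- B's scan, re-expressed through pvLmr
def pvScanL (items : List (String × List (String × String))) (names : List String)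
    (ptype : Option String) : List Int → Option String
  | [] => none
  | r :: rest =>
    match pvLmr items names r with
    | none => none
    | some kv => if pvPass ptype kv then some kv.1 else pvScanL items names ptype rest

-- the common reference: per-name scan, first accepted candidate wins
def pvLoopRef (items : List (String × List (String × String))) (ptype : Option String) :
    List String → Option String
  | [] => none
  | n :: rest =>
    match pvCand items (PySem.Str.lower n) with
    | none => pvLoopRef items ptype rest
    | some kv => if pvPass ptype kv then some kv.1 else pvLoopRef items ptype rest

-- ascending list of occupied ranks from s upward
def pvIdxs (items : List (String × List (String × String))) (names : List String) (s : Nat) :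
    List Int :=
  ((List.range' s (names.length - s)).map (fun (j : Nat) => (j : Int))).filter
    (fun r => (pvLmr items names r).isSome)

-- pull the accumulator out of a last-match fold
theorem foldl_lastMatch_acc {α : Type} (p : α → Bool) (l : List α) (a : Option α) :
    l.foldl (fun acc x => if p x then some x else acc) a
      = match l.foldl (fun acc x => if p x then some x else acc) none with
        | some y => some y
        | none => a := by
  induction l generalizing a with
  | nil => rfl
  | cons x l ih =>
    simp only [List.foldl_cons]
    rw [ih, ih (if p x then some x else none)]
    generalize l.foldl (fun acc x => if p x then some x else acc) none = r
    cases r <;> by_cases h : p x = true <;> simp [h]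

-- a last-match fold result is a member of the list
theorem mem_of_foldl_lastMatch {α : Type} (p : α → Bool) (l : List α) (a : Option α) (y : α)
    (h : l.foldl (fun acc x => if p x then some x else acc) a = some y) :
    y ∈ l ∨ a = some y := by
  induction l generalizing a with
  | nil => exact Or.inr h
  | cons x l ih =>
    simp only [List.foldl_cons] at h
    rcases ih _ h with h' | h'
    · exact Or.inl (List.mem_cons_of_mem _ h')
    · by_cases hp : p x = true
      · simp only [hp, if_true, Option.some.injEq] at h'
        exact Or.inl (h' ▸ List.mem_cons_self)
      · simp only [hp] at h'
        exact Or.inr h'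

-- a last-match fold result (from a none start) satisfies the predicate
theorem pred_of_foldl_lastMatch {α : Type} (p : α → Bool) (l : List α) (y : α)
    (h : l.foldl (fun acc x => if p x then some x else acc) none = some y) :
    p y = true := by
  induction l with
  | nil => cases h
  | cons x l ih =>
    simp only [List.foldl_cons] at h
    rw [foldl_lastMatch_acc] at h
    cases hl : l.foldl (fun acc x => if p x then some x else acc) none with
    | some z =>
      rw [hl] at h
      simp only [Option.some.injEq] at h
      exact ih (h ▸ hl)
    | none =>
      rw [hl] at h
      by_cases hp : p x = true
      · simp only [hp, if_true, Option.some.injEq] at h; exact h ▸ hp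
      · simp [hp] at h

-- get? of a fold of inserts = last matching insertion, else the initial dict  (A's `lowered`)
theorem get?_foldl_insert_lower (ks : List String) (a : PySem.Dict String String) (t : String) :
    (ks.foldl (fun acc k => acc.insert (PySem.Str.lower k) k) a).get? t
      = match ks.foldl (fun acc k => if PySem.Str.lower k == t then some k else acc) none with
        | some k => some k
        | none => a.get? t := by
  induction ks generalizing a with
  | nil => rfl
  | cons k ks ih =>
    simp only [List.foldl_cons]
    rw [ih, foldl_lastMatch_acc (fun k => PySem.Str.lower k == t) ks
          (if (PySem.Str.lower k == t) = true then some k else none)]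
    generalize ks.foldl (fun acc k => if (PySem.Str.lower k == t) = true then some k else acc) none = r
    cases r with
    | some k' => rfl
    | none =>
      rw [PySem.Dict.get?_insert]
      by_cases h : PySem.Str.lower k = t
      · simp [h]
      · simp [h, Ne.symm h]

-- the keys-side last match is the first component of the items-side last match
theorem foldl_lastMatch_map_fst {α β : Type} (p : α → Bool)
    (l : List (α × β)) (a : Option (α × β)) :
    l.foldl (fun acc kv => if p kv.1 then some kv.1 else acc) (a.map (·.1))
      = (l.foldl (fun acc kv => if p kv.1 then some kv else acc) a).map (·.1) := by
  induction l generalizing a with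
  | nil => rfl
  | cons kv l ih =>
    simp only [List.foldl_cons]
    by_cases h : p kv.1 = true
    · simp only [h, if_true]; exact ih (some kv)
    · simp only [h]; exact ih a

-- A's loop equals the reference loop
theorem findLoopA_eq_loopRef (d : PySem.Dict String (List (String × String)))
    (hnd : d.keys.Nodup) (names : List String) (ptype : Option String) :
    findLoopA d (d.keys.foldl (fun acc k => acc.insert (PySem.Str.lower k) k) PySem.Dict.empty)
        names ptype
      = pvLoopRef d.items ptype names := by
  induction names with
  | nil => rfl
  | cons name rest ih =>
    simp only [findLoopA, pvLoopRef, pvCand]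
    have hkeys : d.keys = d.items.map (·.1) := rfl
    have hmap := foldl_lastMatch_map_fst (fun k => PySem.Str.lower k == PySem.Str.lower name)
      d.items (none : Option (String × List (String × String)))
    simp only [Option.map_none] at hmap
    rw [get?_foldl_insert_lower, hkeys, List.foldl_map, hmap]
    cases hfold : d.items.foldl
        (fun acc kv => if PySem.Str.lower kv.1 == PySem.Str.lower name then some kv else acc)
        (none : Option (String × List (String × String))) with
    | none => simpa [hfold, PySem.Dict.get?_empty] using ih
    | some kv =>
      obtain ⟨k, v⟩ := kv
      have hmem : (k, v) ∈ d.items := by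
        rcases mem_of_foldl_lastMatch _ _ _ _ hfold with h | h
        · exact h
        · cases h
      have hget : d.get? k = some v := PySem.Dict.get?_of_mem_items d hmem hnd
      simp only [Option.map_some, hget]
      cases hpt : pvTruthy ptype with
      | false => simp [pvPass, hpt]
      | true =>
        simp only [if_true, pvPass, hpt, Bool.true_and]
        by_cases hne : (((PySem.Dict.ofList v).get? "type") != ptype) = true
        · simp only [hne, if_true, Bool.not_true, if_false]; exact ih
        · simp only [Bool.not_eq_true] at hne; simp [hne, ih]

-- rank dict characterization: first-occurrence index of each lowered name
theorem get?_foldl_setdefault (names : List String) (s : Int) (a : PySem.Dict String Int)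
    (t : String) :
    ((PySem.List.enumerate names s).foldl
        (fun acc p =>
          let low := PySem.Str.lower p.2
          if acc.contains low then acc else acc.insert low p.1) a).get? t
      = match a.get? t with
        | some v => some v
        | none => (names.findIdx? (fun n => PySem.Str.lower n == t)).map (fun j => s + (j : Int)) := by
  induction names generalizing s a with
  | nil => cases ha : a.get? t <;> simp [PySem.List.enumerate_nil, ha]
  | cons n ns ih =>
    rw [PySem.List.enumerate_cons, List.foldl_cons, ih, List.findIdx?_cons]
    simp only []
    by_cases hlt : PySem.Str.lower n = t
    · subst hlt
      cases ha : a.get? (PySem.Str.lower n) with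
      | some v =>
        have hc : a.contains (PySem.Str.lower n) = true := by
          rw [PySem.Dict.contains_eq_isSome_get?, ha]; rfl
        simp [hc, ha]
      | none =>
        have hc : a.contains (PySem.Str.lower n) = false := by
          rw [PySem.Dict.contains_eq_isSome_get?, ha]; rfl
        simp [hc, PySem.Dict.get?_insert_self, ha]
    · have hbeq : (PySem.Str.lower n == t) = false := by simp [hlt]
      rw [hbeq]
      have hget : ∀ (b : PySem.Dict String Int),
          (if b.contains (PySem.Str.lower n) then b
           else b.insert (PySem.Str.lower n) s).get? t = b.get? t := by
        intro b
        by_cases hb : b.contains (PySem.Str.lower n) = true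
        · simp [hb]
        · simp only [Bool.not_eq_true] at hb
          simp [hb, PySem.Dict.get?_insert, hlt, Ne.symm hlt]
      rw [hget]
      cases a.get? t with
      | some v => simp
      | none =>
        simp only [if_false]
        cases ns.findIdx? (fun n => PySem.Str.lower n == t) with
        | none => simp
        | some j =>
          simp
          omega

-- best dict characterization: get? r is the last item whose g-value is r
theorem get?_foldl_rankInsert (items : List (String × List (String × String)))
    (g : String × List (String × String) → Option Int)
    (a : PySem.Dict Int (String × List (String × String))) (r : Int) :
    (items.foldl (fun acc kv =>
        match g kv with
        | some r' => acc.insert r' kv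
        | none => acc) a).get? r
      = match items.foldl (fun acc kv => if g kv == some r then some kv else acc) none with
        | some kv => some kv
        | none => a.get? r := by
  induction items generalizing a with
  | nil => rfl
  | cons kv items ih =>
    simp only [List.foldl_cons]
    rw [ih, foldl_lastMatch_acc (fun kv => g kv == some r) items
          (if (g kv == some r) = true then some kv else none)]
    generalize items.foldl (fun acc kv => if (g kv == some r) = true then some kv else acc) none = res
    cases res with
    | some kv' => rfl
    | none =>
      cases hg : g kv with
      | none => simp [hg]
      | some r' =>
        rw [PySem.Dict.get?_insert]
        by_cases h : r' = r
        · simp [hg, h]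
        · have : ((some r' : Option Int) == some r) = false := by simp [h]
          simp [hg, this, h, Ne.symm h]

-- the best fold, rewritten so the nodup-keys library lemma applies
theorem foldl_rankInsert_eq_filterMap (items : List (String × List (String × String)))
    (g : String × List (String × String) → Option Int)
    (a : PySem.Dict Int (String × List (String × String))) :
    items.foldl (fun acc kv =>
        match g kv with
        | some r => acc.insert r kv
        | none => acc) a
      = (items.filterMap (fun kv => (g kv).map (fun r => (r, kv)))).foldl
          (fun acc p => acc.insert p.1 p.2) a := by
  induction items generalizing a with
  | nil => rfl
  | cons kv items ih =>
    cases hg : g kv with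
    | none => simp [List.filterMap_cons, hg, ih]
    | some r => simp [List.filterMap_cons, hg, ih]

-- facts about pvRk
theorem pvRk_some (names : List String) (t : String) (r : Int) (h : pvRk names t = some r) :
    ∃ j : Nat, r = (j : Int) ∧ ∃ hj : j < names.length,
      PySem.Str.lower names[j] = t ∧ ∀ i, i < j → (hi : i < names.length) →
        PySem.Str.lower names[i] ≠ t := by
  unfold pvRk at h
  cases hf : names.findIdx? (fun n => PySem.Str.lower n == t) with
  | none => simp [hf] at h
  | some j =>
    simp only [hf, Option.map_some, Option.some.injEq] at h
    obtain ⟨hj, hp, hmin⟩ := List.findIdx?_eq_some_iff_getElem.mp hf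
    refine ⟨j, by omega, hj, by simpa using hp, ?_⟩
    intro i hij hi
    simpa using hmin i hij

theorem pvLmr_rk (items : List (String × List (String × String))) (names : List String)
    (r : Int) (kv : String × List (String × String)) (h : pvLmr items names r = some kv) :
    pvRk names (PySem.Str.lower kv.1) = some r := by
  unfold pvLmr at h
  have h2 : (fun kv => pvRk names (PySem.Str.lower kv.1) == some r) kv = true :=
    pred_of_foldl_lastMatch _ items kv h
  simp only [beq_iff_eq] at h2
  exact h2

-- when the rank of lowered names[s] is s itself, the rank-r last match IS the plain candidate
theorem pvLmr_eq_cand (items : List (String × List (String × String))) (names : List String)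
    (s : Nat) (hs : s < names.length)
    (hr : pvRk names (PySem.Str.lower names[s]) = some (s : Int)) :
    pvLmr items names (s : Int) = pvCand items (PySem.Str.lower names[s]) := by
  have hfun : (fun (acc : Option (String × List (String × String))) kv =>
        if pvRk names (PySem.Str.lower kv.1) == some (s : Int) then some kv else acc)
      = (fun acc kv =>
        if PySem.Str.lower kv.1 == PySem.Str.lower names[s] then some kv else acc) := by
    funext acc kv
    by_cases h : PySem.Str.lower kv.1 = PySem.Str.lower names[s]
    · rw [h, hr]; simp
    · have hne : pvRk names (PySem.Str.lower kv.1) ≠ some (s : Int) := by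
        intro hc
        obtain ⟨j, hj, hjl, hlow, _⟩ := pvRk_some _ _ _ hc
        have hjs : j = s := by omega
        subst hjs
        exact h hlow.symm
      have h1 : (pvRk names (PySem.Str.lower kv.1) == some (s : Int)) = false := by
        simpa using hne
      have h2 : (PySem.Str.lower kv.1 == PySem.Str.lower names[s]) = false := by
        simpa using h
      rw [h1, h2]
  unfold pvLmr pvCand
  rw [hfun]

-- B's scan over best = the pvLmr scan
theorem scanRanks_eq_scanL (best : PySem.Dict Int (String × List (String × String)))
    (items : List (String × List (String × String))) (names : List String)
    (ptype : Option String) (h : ∀ r, best.get? r = pvLmr items names r) (rs : List Int) :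
    scanRanks best ptype rs = pvScanL items names ptype rs := by
  induction rs with
  | nil => rfl
  | cons r rs ih =>
    simp only [scanRanks, pvScanL, h r]
    cases pvLmr items names r with
    | none => rfl
    | some kv => simp only [pvPass]; split_ifs <;> simp [ih]

-- the main bridge: scanning occupied ranks from s = the reference loop on names.drop s
theorem scanL_idxs_eq_loopRef (items : List (String × List (String × String)))
    (names : List String) (ptype : Option String) :
    ∀ k s, s + k = names.length →
      (∀ j, (hj : j < names.length) → j < s →
        ∀ kv, pvCand items (PySem.Str.lower names[j]) = some kv → pvPass ptype kv = false) →
      pvScanL items names ptype (pvIdxs items names s) = pvLoopRef items ptype (names.drop s) := by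
  intro k
  induction k with
  | zero =>
    intro s hs _
    have h1 : names.length - s = 0 := by omega
    have h2 : names.drop s = [] := List.drop_of_length_le (by omega)
    simp [pvIdxs, h1, h2, pvScanL, pvLoopRef]
  | succ k ih =>
    intro s hs H
    have hlt : s < names.length := by omega
    rw [List.drop_eq_getElem_cons hlt]
    have hrange : List.range' s (names.length - s) = s :: List.range' (s + 1) (names.length - (s + 1)) := by
      have : names.length - s = (names.length - (s + 1)) + 1 := by omega
      rw [this, List.range'_succ]
    have hidx : pvIdxs items names s
        = (if (pvLmr items names (s : Int)).isSome then [(s : Int)] else [])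
          ++ pvIdxs items names (s + 1) := by
      unfold pvIdxs
      rw [hrange, List.map_cons, List.filter_cons]
      split_ifs <;> simp
    -- rank of the lowered name at s
    have hpx : (fun n => PySem.Str.lower n == PySem.Str.lower names[s]) names[s] = true := by simp
    cases hf : names.findIdx? (fun n => PySem.Str.lower n == PySem.Str.lower names[s]) with
    | none =>
      exact absurd (List.findIdx?_eq_none_iff.mp hf names[s] (names.getElem_mem hlt)) (by simp)
    | some j =>
      obtain ⟨hjl, hpj, hmin⟩ := List.findIdx?_eq_some_iff_getElem.mp hf
      have hjs : j ≤ s := by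
        by_contra hc
        have := hmin s (by omega)
        simp at this
      have hrk : pvRk names (PySem.Str.lower names[s]) = some (j : Int) := by
        unfold pvRk; rw [hf]; rfl
      by_cases hjeq : j = s
      · -- first occurrence of this lowered name
        subst hjeq
        have hcand := pvLmr_eq_cand items names j hlt hrk
        cases hc : pvCand items (PySem.Str.lower names[j]) with
        | none =>
          rw [hidx, hcand, hc]
          simp only [Option.isSome_none, if_false, List.nil_append]
          show pvScanL items names ptype (pvIdxs items names (j + 1))
              = pvLoopRef items ptype (names[j] :: names.drop (j + 1))
          rw [show pvLoopRef items ptype (names[j] :: names.drop (j + 1))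
                = pvLoopRef items ptype (names.drop (j + 1)) by simp [pvLoopRef, hc]]
          refine ih (j + 1) (by omega) ?_
          intro j' hj' hlt' kv hkv
          rcases Nat.lt_succ_iff_lt_or_eq.mp hlt' with h' | h'
          · exact H j' hj' h' kv hkv
          · subst h'; rw [hkv] at hc; cases hc
        | some kv =>
          rw [hidx, hcand, hc]
          simp only [Option.isSome_some, if_true, List.singleton_append]
          show pvScanL items names ptype ((j : Int) :: pvIdxs items names (j + 1)) = _
          simp only [pvScanL, pvLoopRef, hcand, hc]
          by_cases hp : pvPass ptype kv = true
          · simp [hp]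
          · simp only [Bool.not_eq_true] at hp
            simp only [hp, if_false]
            refine ih (j + 1) (by omega) ?_
            intro j' hj' hlt' kv' hkv'
            rcases Nat.lt_succ_iff_lt_or_eq.mp hlt' with h' | h'
            · exact H j' hj' h' kv' hkv'
            · subst h'; rw [hkv'] at hc; cases hc; exact hp
      · -- duplicate lowered name: its rank j is < s, already handled
        have hjlt : j < s := by omega
        have hlow : PySem.Str.lower names[j] = PySem.Str.lower names[s] := by simpa using hpj
        have hnone : (pvLmr items names (s : Int)).isSome = false := by
          cases hl : pvLmr items names (s : Int) with
          | none => rfl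
          | some kv =>
            exfalso
            have hrk' := pvLmr_rk items names _ kv hl
            obtain ⟨j', hj', hjl', hlow', _⟩ := pvRk_some _ _ _ hrk'
            have hj's : j' = s := by omega
            rw [← hlow'] at hrk'
            simp only [hj's] at hrk'
            rw [hrk] at hrk'
            have : (j : Int) = (s : Int) := by
              have := Option.some.inj hrk'
              omega
            omega
        rw [hidx, hnone]
        simp only [Bool.false_eq_true, if_false, List.nil_append]
        have hskip : pvLoopRef items ptype (names[s] :: names.drop (s + 1))
            = pvLoopRef items ptype (names.drop (s + 1)) := by
          simp only [pvLoopRef]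
          cases hc : pvCand items (PySem.Str.lower names[s]) with
          | none => rfl
          | some kv =>
            have := H j hjl hjlt kv (by rw [hlow]; exact hc)
            simp [this]
        rw [hskip]
        refine ih (s + 1) (by omega) ?_
        intro j' hj' hlt' kv hkv
        rcases Nat.lt_succ_iff_lt_or_eq.mp hlt' with h' | h'
        · exact H j' hj' h' kv hkv
        · subst h'
          exact H j hjl hjlt kv (by rw [hlow]; exact hkv)

-- B equals the reference loop
theorem find_prop_alt_eq_loopRef (props : List (String × List (String × String)))
    (names : List String) (ptype : Option String) :
    find_prop_alt props names ptype = pvLoopRef (PySem.Dict.ofList props).items ptype names := by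
  have hrank : ∀ t, ((PySem.List.enumerate names 0).foldl
      (fun acc p =>
        let low := PySem.Str.lower p.2
        if acc.contains low then acc else acc.insert low p.1)
      (PySem.Dict.empty : PySem.Dict String Int)).get? t = pvRk names t := by
    intro t
    rw [get?_foldl_setdefault]
    rw [show (PySem.Dict.empty : PySem.Dict String Int).get? t = none from PySem.Dict.get?_empty t]
    unfold pvRk
    cases names.findIdx? (fun n => PySem.Str.lower n == t) with
    | none => rfl
    | some j => simp
  unfold find_prop_alt
  simp only [hrank]
  set items := (PySem.Dict.ofList props).items with hitems
  set best := items.foldl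
      (fun acc kv =>
        match pvRk names (PySem.Str.lower kv.1) with
        | some r => acc.insert r kv
        | none => acc)
      (PySem.Dict.empty : PySem.Dict Int (String × List (String × String))) with hbest
  have hget : ∀ r, best.get? r = pvLmr items names r := by
    intro r
    rw [hbest, get?_foldl_rankInsert items (fun kv => pvRk names (PySem.Str.lower kv.1))]
    unfold pvLmr
    cases items.foldl
        (fun acc kv => if pvRk names (PySem.Str.lower kv.1) == some r then some kv else acc)
        (none : Option (String × List (String × String))) with
    | none => exact PySem.Dict.get?_empty r
    | some kv => rfl
  have hnodup : best.keys.Nodup := by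
    rw [hbest, foldl_rankInsert_eq_filterMap]
    exact PySem.Dict.nodup_keys_foldl_insert_key _ _ _ _ PySem.Dict.nodup_keys_empty
  have hpw : (pvIdxs items names 0).Pairwise (· < ·) := by
    unfold pvIdxs
    exact ((List.pairwise_lt_range' 1).map _
      (fun a b h => by exact_mod_cast h)).filter _
  have hperm : (pvIdxs items names 0).Perm best.keys := by
    refine (List.perm_ext_iff_of_nodup (hpw.imp ne_of_lt) hnodup).mpr ?_
    intro r
    have hr : r ∈ best.keys ↔ (pvLmr items names r).isSome = true := by
      rw [← PySem.Dict.contains_iff_mem_keys, PySem.Dict.contains_eq_isSome_get?, hget]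
    rw [hr]
    unfold pvIdxs
    rw [List.mem_filter]
    constructor
    · exact fun h => h.2
    · intro h
      refine ⟨?_, h⟩
      cases hl : pvLmr items names r with
      | none => rw [hl] at h; cases h
      | some kv =>
        obtain ⟨j, hj, hjl, _, _⟩ := pvRk_some _ _ _ (pvLmr_rk items names r kv hl)
        refine List.mem_map.mpr ⟨j, ?_, hj.symm⟩
        rw [List.mem_range'_1]
        omega
  have hsorted : PySem.List.sorted best.keys (fun x => x) false = pvIdxs items names 0 :=
    PySem.List.sorted_eq_of_perm_of_pairwise_lt _ _ _ hperm hpw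
  rw [hsorted, scanRanks_eq_scanL best items names ptype hget]
  have hmain := scanL_idxs_eq_loopRef items names ptype names.length 0 (by omega)
    (fun j hj h0 kv _ => absurd h0 (Nat.not_lt_zero j))
  simpa using hmain

-- ===== VERDICT (by name: the statement is the Claim_ definition above) =====
theorem find_prop_spec : Claim_equal_find_prop := by
  intro props names ptype _
  show find_prop props names ptype = find_prop_alt props names ptype
  rw [find_prop_alt_eq_loopRef]
  exact findLoopA_eq_loopRef (PySem.Dict.ofList props) (PySem.Dict.nodup_keys_ofList props)
    names ptype
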